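-- pv_equiv track=rewrite | github.com/wahahaXDD/Lab | phase_0/transformCCN.py | findDataIntel
-- ===== SOURCE A (Python) =====
-- def findDataIntel(rawData):
--     pivot = 0
--     for i in range(len(rawData)):
--         for j in range(len(rawData[i])):
--             if 'CCN Number Conc' in rawData[i][j]:
--                 pivot = i
--                 break
--     return pivot
-- ===== SOURCE B (Python) =====
-- def findDataIntel(rawData):
--     target = 'CCN Number Conc'
--     for i in reversed(range(len(rawData))):
--         if any(target in cell for cell in rawData[i]):
--             return i
--     return 0
-- ===== Notes on version B (the rewrite author's own statement) =====
-- stated objective: alternative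
-- what changed: B scans rows bottom-up and returns the first matching row index immediately (early return), instead of A's full forward scan that keeps overwriting a pivot accumulator.
import Mathlib
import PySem

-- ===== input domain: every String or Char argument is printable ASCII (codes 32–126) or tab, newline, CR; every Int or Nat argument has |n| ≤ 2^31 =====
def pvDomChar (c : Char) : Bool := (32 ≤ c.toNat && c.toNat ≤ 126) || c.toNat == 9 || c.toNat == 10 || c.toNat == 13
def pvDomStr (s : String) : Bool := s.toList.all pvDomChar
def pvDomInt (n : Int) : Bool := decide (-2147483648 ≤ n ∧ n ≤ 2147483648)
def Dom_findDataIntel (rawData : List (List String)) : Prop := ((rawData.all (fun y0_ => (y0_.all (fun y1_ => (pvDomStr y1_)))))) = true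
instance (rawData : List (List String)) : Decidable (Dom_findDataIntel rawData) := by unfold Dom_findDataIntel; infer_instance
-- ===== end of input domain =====

-- B scans rows bottom-up and returns the first matching row index immediately (early return),
-- instead of A's full forward scan overwriting a pivot accumulator; alternative decomposition, same result.

def pvTarget : String := "CCN Number Conc"

-- ===== PORT A =====
-- inner 'for j' loop: sets pivot := i and breaks on the first matching cell
def pvRowLoopA (i : Int) (row : List String) (pivot : Int) : Int :=
  match row with
  | [] => pivot
  | c :: rest => if PySem.Str.isIn pvTarget c then i else pvRowLoopA i rest pivot

-- outer 'for i' loop carrying (i, pivot)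
def pvLoopA (rows : List (List String)) (i pivot : Int) : Int :=
  match rows with
  | [] => pivot
  | r :: rs => pvLoopA rs (i + 1) (pvRowLoopA i r pivot)

def findDataIntel (rawData : List (List String)) : Int :=
  pvLoopA rawData 0 0

-- ===== PORT B =====
-- any(target in cell for cell in row)
def pvRowHas (row : List String) : Bool :=
  row.any (fun c => PySem.Str.isIn pvTarget c)

-- 'for i in reversed(range(len(rawData)))' with early return; k = i + 1
def pvLoopB (rows : List (List String)) : Nat → Int
  | 0 => 0
  | k + 1 => if pvRowHas (rows.getD k []) then (k : Int) else pvLoopB rows k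

def findDataIntel_alt (rawData : List (List String)) : Int :=
  pvLoopB rawData rawData.length

-- ===== PRECONDITION & SPEC =====
def Spec_findDataIntel (rawData : List (List String)) (out : Int) : Prop := out = findDataIntel_alt rawData
instance (rawData : List (List String)) (out : Int) : Decidable (Spec_findDataIntel rawData out) := by unfold Spec_findDataIntel; infer_instance

-- ===== CLAIM (what is proved, stated in full; the proofs are below) =====
def Claim_equal_findDataIntel : Prop := ∀ (rawData : List (List String)), Dom_findDataIntel rawData → Spec_findDataIntel rawData (findDataIntel rawData)

-- ===== LEMMAS AND PROOFS =====

-- index of the LAST row containing the target, if any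
def pvLastHit : List (List String) → Option Nat
  | [] => none
  | r :: rs =>
    match pvLastHit rs with
    | some k => some (k + 1)
    | none => if pvRowHas r then some 0 else none

theorem pvRowLoopA_eq (i : Int) (row : List String) (pivot : Int) :
    pvRowLoopA i row pivot = if pvRowHas row then i else pivot := by
  induction row with
  | nil => simp [pvRowLoopA, pvRowHas]
  | cons c rest ih =>
    simp only [pvRowLoopA, ih, pvRowHas, List.any_cons]
    simp only [Bool.or_eq_true]
    split_ifs <;> tauto

theorem pvLoopA_eq (rows : List (List String)) :
    ∀ (i pivot : Int), pvLoopA rows i pivot =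
      match pvLastHit rows with
      | some k => i + (k : Int)
      | none => pivot := by
  induction rows with
  | nil => intro i pivot; simp [pvLoopA, pvLastHit]
  | cons r rs ih =>
    intro i pivot
    simp only [pvLoopA, pvLastHit, ih, pvRowLoopA_eq]
    cases h : pvLastHit rs with
    | some k => push_cast; ring_nf
    | none => split_ifs <;> simp

theorem pvLoopB_append (rs : List (List String)) (r : List String) :
    ∀ k, k ≤ rs.length → pvLoopB (rs ++ [r]) k = pvLoopB rs k := by
  intro k
  induction k with
  | zero => intro _; rfl
  | succ k ih =>
    intro hk
    have hk' : k < rs.length := hk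
    simp only [pvLoopB, ih (Nat.le_of_lt hk')]
    have : (rs ++ [r]).getD k [] = rs.getD k [] := by
      simp [List.getD, List.getElem?_append_left hk']
    rw [this]

theorem pvLastHit_append (rs : List (List String)) (r : List String) :
    pvLastHit (rs ++ [r]) = if pvRowHas r then some rs.length else pvLastHit rs := by
  induction rs with
  | nil => simp [pvLastHit]
  | cons x xs ih =>
    simp only [List.cons_append, pvLastHit, ih]
    split_ifs <;> cases h : pvLastHit xs <;> simp

theorem pvLoopB_eq (rows : List (List String)) :
    pvLoopB rows rows.length =
      match pvLastHit rows with
      | some k => (k : Int)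
      | none => 0 := by
  induction rows using List.reverseRecOn with
  | nil => rfl
  | append_singleton rs r ih =>
    have hlen : (rs ++ [r]).length = rs.length + 1 := by simp
    rw [hlen]
    simp only [pvLoopB, pvLastHit_append]
    have hgd : (rs ++ [r]).getD rs.length [] = r := by
      simp [List.getD]
    rw [hgd, pvLoopB_append rs r rs.length (Nat.le_refl _), ih]
    split_ifs <;> rfl

-- ===== VERDICT (by name: the statement is the Claim_ definition above) =====
theorem findDataIntel_spec : Claim_equal_findDataIntel := by
  intro rawData _
  unfold Spec_findDataIntel findDataIntel findDataIntel_alt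
  rw [pvLoopA_eq, pvLoopB_eq]
  cases h : pvLastHit rawData <;> simp
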